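-- pv_equiv track=rewrite | github.com/leeguooooo/prompt-language-coach | plugins/prompt-language-coach/scripts/build_changelog.py | categorize_commits
-- ===== SOURCE A (Python) =====
-- from collections import OrderedDict
--
-- DEFAULT_SECTIONS = OrderedDict(
--     [
--         ("Features", ("feat:",)),
--         ("Fixes", ("fix:",)),
--         ("Docs", ("docs:",)),
--         ("Refactors", ("refactor:",)),
--         ("Tests", ("test:",)),
--         ("CI", ("ci:",)),
--         ("Chores", ("chore:",)),
--     ]
-- )
--
-- def categorize_commits(commits: list[str]) -> OrderedDict[str, list[str]]:
--     buckets: OrderedDict[str, list[str]] = OrderedDict((name, []) for name in DEFAULT_SECTIONS)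
--     buckets["Other"] = []
--     for subject in commits:
--         lowered = subject.casefold()
--         matched = False
--         for section, prefixes in DEFAULT_SECTIONS.items():
--             if any(lowered.startswith(prefix) for prefix in prefixes):
--                 buckets[section].append(subject)
--                 matched = True
--                 break
--         if not matched:
--             buckets["Other"].append(subject)
--     return buckets
-- ===== SOURCE B (Python) =====
-- from collections import OrderedDict
--
-- DEFAULT_SECTIONS = OrderedDict(
--     [
--         ("Features", ("feat:",)),
--         ("Fixes", ("fix:",)),
--         ("Docs", ("docs:",)),
--         ("Refactors", ("refactor:",)),
--         ("Tests", ("test:",)),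
--         ("CI", ("ci:",)),
--         ("Chores", ("chore:",)),
--     ]
-- )
--
-- _PREFIX_TO_SECTION = {p: name for name, prefixes in DEFAULT_SECTIONS.items() for p in prefixes}
--
-- def categorize_commits(commits: list[str]) -> OrderedDict[str, list[str]]:
--     buckets: OrderedDict[str, list[str]] = OrderedDict((name, []) for name in DEFAULT_SECTIONS)
--     buckets["Other"] = []
--     for subject in commits:
--         lowered = subject.casefold()
--         i = lowered.find(":")
--         key = lowered[: i + 1] if i >= 0 else None
--         buckets[_PREFIX_TO_SECTION.get(key, "Other")].append(subject)
--     return buckets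
-- ===== Notes on version B (the rewrite author's own statement) =====
-- stated objective: idiomatic
-- what changed: B replaces A's per-commit linear scan over the section/prefix table (startswith against each prefix with a matched flag and break) by extracting the commit's ':'-terminated key once via a slice and doing a single hash lookup in a prefix-to-section dict built from DEFAULT_SECTIONS.
import Mathlib
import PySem

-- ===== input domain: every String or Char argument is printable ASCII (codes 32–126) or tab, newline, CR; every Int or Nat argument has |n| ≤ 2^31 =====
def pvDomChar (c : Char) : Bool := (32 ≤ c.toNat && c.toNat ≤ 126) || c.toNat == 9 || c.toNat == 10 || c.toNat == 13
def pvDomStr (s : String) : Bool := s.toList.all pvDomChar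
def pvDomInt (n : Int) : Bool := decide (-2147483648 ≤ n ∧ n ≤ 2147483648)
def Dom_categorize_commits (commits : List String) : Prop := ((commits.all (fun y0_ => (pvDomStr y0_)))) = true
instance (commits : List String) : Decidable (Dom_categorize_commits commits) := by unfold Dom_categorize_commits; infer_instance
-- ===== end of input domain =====

-- B replaces A's per-commit scan over the section/prefix table by one ':'-keyed slice and one dict
-- lookup (objective: idiomatic).  `.casefold()` is ported as PySem.Str.lower — exact on the ASCII Dom.

-- ===== PORT A =====
-- DEFAULT_SECTIONS (one tuple of prefixes per section)
def pvSections : List (String × List String) :=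
  [("Features", ["feat:"]), ("Fixes", ["fix:"]), ("Docs", ["docs:"]),
   ("Refactors", ["refactor:"]), ("Tests", ["test:"]), ("CI", ["ci:"]), ("Chores", ["chore:"])]

-- the inner `for section, prefixes in DEFAULT_SECTIONS.items(): if any(...): ...; break` loop
-- (`none` = the loop ran out without `break`, i.e. `matched` stayed False)
def pvFindSectionA (lowered : String) : List (String × List String) → Option String
  | [] => none
  | (sec, prefixes) :: rest =>
      if prefixes.any (fun p => PySem.Str.startswith lowered p) then some sec
      else pvFindSectionA lowered rest

def categorize_commits (commits : List String) : List (String × List String) :=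
  let buckets : PySem.Dict String (List String) :=
    pvSections.foldl (fun d nm => PySem.Dict.insert d nm.1 []) PySem.Dict.empty
  let buckets := PySem.Dict.insert buckets "Other" []
  (commits.foldl (fun b subject =>
      let lowered := PySem.Str.lower subject   -- casefold = lower on ASCII
      match pvFindSectionA lowered pvSections with
      | some sec => PySem.Dict.modify b sec [] (fun xs => xs ++ [subject])
      | none => PySem.Dict.modify b "Other" [] (fun xs => xs ++ [subject])) buckets).items

-- ===== PORT B =====
-- _PREFIX_TO_SECTION
def pvPrefixToSection : PySem.Dict String String :=
  PySem.Dict.ofList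
    [("feat:", "Features"), ("fix:", "Fixes"), ("docs:", "Docs"),
     ("refactor:", "Refactors"), ("test:", "Tests"), ("ci:", "CI"), ("chore:", "Chores")]

def categorize_commits_alt (commits : List String) : List (String × List String) :=
  let buckets : PySem.Dict String (List String) :=
    pvSections.foldl (fun d nm => PySem.Dict.insert d nm.1 []) PySem.Dict.empty
  let buckets := PySem.Dict.insert buckets "Other" []
  (commits.foldl (fun b subject =>
      let lowered := PySem.Str.lower subject   -- casefold = lower on ASCII
      let i := PySem.Str.find lowered ":"
      let sec := if 0 ≤ i then
          PySem.Dict.getD pvPrefixToSection (PySem.Str.slice lowered none (some (i + 1))) "Other"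
        else "Other"
      PySem.Dict.modify b sec [] (fun xs => xs ++ [subject])) buckets).items

-- ===== PRECONDITION & SPEC =====
def Spec_categorize_commits (commits : List String) (out : List (String × List String)) : Prop := out = categorize_commits_alt commits
instance (commits : List String) (out : List (String × List String)) : Decidable (Spec_categorize_commits commits out) := by unfold Spec_categorize_commits; infer_instance

-- ===== CLAIM (what is proved, stated in full; the proofs are below) =====
def Claim_equal_categorize_commits : Prop := ∀ (commits : List String), Dom_categorize_commits commits → Spec_categorize_commits commits (categorize_commits commits)

-- ===== LEMMAS AND PROOFS =====

theorem pv_singleton_prefix_iff (c : Char) (l : List Char) : [c] <+: l ↔ l.head? = some c := by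
  cases l with
  | nil => simp
  | cons a t =>
      constructor
      · rintro ⟨u, hu⟩; simp at hu; simp [hu.1]
      · intro h; simp at h; exact ⟨t, by simp [h]⟩

-- a prefix of shape q ++ ":" (no ':' inside q) matches exactly when the slice
-- up to (and including) the FIRST ':' equals that prefix
theorem pv_startswith_iff_key (cs q : List Char) (hq : ':' ∉ q) :
    PySem.Chars.startswith cs (q ++ [':']) = true ↔
      0 ≤ PySem.Chars.find cs [':'] ∧
        cs.take ((PySem.Chars.find cs [':']).toNat + 1) = q ++ [':'] := by
  constructor
  · intro h
    rw [PySem.Chars.startswith_iff] at h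
    obtain ⟨rest, hrest⟩ := h
    have hcs : cs = q ++ ':' :: rest := by rw [← hrest]; simp
    subst hcs
    have h1 : [':'] <+: (q ++ ':' :: rest).drop q.length := by
      rw [pv_singleton_prefix_iff, List.head?_drop]
      simp
    have hnn : 0 ≤ PySem.Chars.find (q ++ ':' :: rest) [':'] := by
      rw [PySem.Chars.find_nonneg_iff, ← PySem.Chars.isIn_iff_infix,
        ← PySem.Chars.exists_prefix_drop_iff_isIn]
      exact ⟨q.length, h1⟩
    obtain ⟨hpre, hmin⟩ := PySem.Chars.find_spec hnn
    set i := (PySem.Chars.find (q ++ ':' :: rest) [':']).toNat with hi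
    have hig : i = q.length := by
      rcases Nat.lt_trichotomy i q.length with hlt | he | hgt
      · exfalso
        rw [pv_singleton_prefix_iff, List.head?_drop] at hpre
        rw [List.getElem?_append_left (by simpa using hlt)] at hpre
        have hg := List.getElem?_eq_getElem (l := q) (by simpa using hlt : i < q.length)
        rw [hg] at hpre
        exact hq ((Option.some_inj.mp hpre) ▸ List.getElem_mem _)
      · exact he
      · exact absurd h1 (hmin _ hgt)
    refine ⟨hnn, ?_⟩
    rw [hig]
    simp [List.take_append]
  · rintro ⟨h0, hkey⟩
    rw [PySem.Chars.startswith_iff, ← hkey]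
    exact List.take_prefix _ _

-- the same, phrased for a String prefix and B's slice
theorem pv_sw_iff (s p : String) (q : List Char) (hp : p.toList = q ++ [':']) (hq : ':' ∉ q)
    (h0 : 0 ≤ PySem.Str.find s ":") :
    PySem.Chars.startswith s.toList p.toList = true ↔
      PySem.Str.slice s none (some (PySem.Str.find s ":" + 1)) = p := by
  have hfind : PySem.Str.find s ":" = PySem.Chars.find s.toList [':'] := by
    simp [PySem.Str.find_eq]
  have hb : (0:Int) ≤ PySem.Str.find s ":" + 1 := by omega
  have hkey : (PySem.Str.slice s none (some (PySem.Str.find s ":" + 1))).toList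
      = s.toList.take ((PySem.Str.find s ":").toNat + 1) := by
    rw [PySem.Str.toList_slice, PySem.Chars.slice_eq_listSlice,
      PySem.List.slice_to s.toList hb]
    congr 1
    omega
  rw [hp, pv_startswith_iff_key _ _ hq, ← hfind]
  constructor
  · rintro ⟨-, h⟩
    apply String.toList_inj.mp
    rw [hkey, hp, h]
  · intro h
    refine ⟨h0, ?_⟩
    rw [← hkey, h, hp]

-- the per-commit selection of A (first matching section, else "Other") equals B's slice-and-lookup
set_option maxHeartbeats 1000000 in
theorem pv_sel_eq (s : String) :
    (match pvFindSectionA s pvSections with | some sec => sec | none => "Other")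
      = (if 0 ≤ PySem.Str.find s ":" then
          PySem.Dict.getD pvPrefixToSection
            (PySem.Str.slice s none (some (PySem.Str.find s ":" + 1))) "Other"
        else "Other") := by
  by_cases h0 : 0 ≤ PySem.Str.find s ":"
  · set key := PySem.Str.slice s none (some (PySem.Str.find s ":" + 1)) with hk
    have e1 : PySem.Chars.startswith s.toList ("feat:" : String).toList = true ↔ "feat:" = key := by
      have h := pv_sw_iff s "feat:" ['f','e','a','t'] rfl (by decide) h0
      rw [← hk] at h
      exact ⟨fun hc => (h.mp hc).symm, fun hc => h.mpr hc.symm⟩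
    have e2 : PySem.Chars.startswith s.toList ("fix:" : String).toList = true ↔ "fix:" = key := by
      have h := pv_sw_iff s "fix:" ['f','i','x'] rfl (by decide) h0
      rw [← hk] at h
      exact ⟨fun hc => (h.mp hc).symm, fun hc => h.mpr hc.symm⟩
    have e3 : PySem.Chars.startswith s.toList ("docs:" : String).toList = true ↔ "docs:" = key := by
      have h := pv_sw_iff s "docs:" ['d','o','c','s'] rfl (by decide) h0
      rw [← hk] at h
      exact ⟨fun hc => (h.mp hc).symm, fun hc => h.mpr hc.symm⟩
    have e4 : PySem.Chars.startswith s.toList ("refactor:" : String).toList = true ↔ "refactor:" = key := by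
      have h := pv_sw_iff s "refactor:" ['r','e','f','a','c','t','o','r'] rfl (by decide) h0
      rw [← hk] at h
      exact ⟨fun hc => (h.mp hc).symm, fun hc => h.mpr hc.symm⟩
    have e5 : PySem.Chars.startswith s.toList ("test:" : String).toList = true ↔ "test:" = key := by
      have h := pv_sw_iff s "test:" ['t','e','s','t'] rfl (by decide) h0
      rw [← hk] at h
      exact ⟨fun hc => (h.mp hc).symm, fun hc => h.mpr hc.symm⟩
    have e6 : PySem.Chars.startswith s.toList ("ci:" : String).toList = true ↔ "ci:" = key := by
      have h := pv_sw_iff s "ci:" ['c','i'] rfl (by decide) h0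
      rw [← hk] at h
      exact ⟨fun hc => (h.mp hc).symm, fun hc => h.mpr hc.symm⟩
    have e7 : PySem.Chars.startswith s.toList ("chore:" : String).toList = true ↔ "chore:" = key := by
      have h := pv_sw_iff s "chore:" ['c','h','o','r','e'] rfl (by decide) h0
      rw [← hk] at h
      exact ⟨fun hc => (h.mp hc).symm, fun hc => h.mpr hc.symm⟩
    have hmk : pvPrefixToSection = PySem.Dict.mk
        [("feat:", "Features"), ("fix:", "Fixes"), ("docs:", "Docs"),
         ("refactor:", "Refactors"), ("test:", "Tests"), ("ci:", "CI"), ("chore:", "Chores")] := by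
      decide
    simp only [pvFindSectionA, pvSections, List.any_cons, List.any_nil, Bool.or_false,
      PySem.Str.startswith_eq, h0, if_true,
      hmk, PySem.Dict.getD_eq_get?_getD, PySem.Dict.get?_mk_cons, beq_iff_eq,
      e1, e2, e3, e4, e5, e6, e7]
    by_cases k1 : "feat:" = key
    · simp only [if_pos k1]; rfl
    by_cases k2 : "fix:" = key
    · simp only [if_neg k1, if_pos k2]; rfl
    by_cases k3 : "docs:" = key
    · simp only [if_neg k1, if_neg k2, if_pos k3]; rfl
    by_cases k4 : "refactor:" = key
    · simp only [if_neg k1, if_neg k2, if_neg k3, if_pos k4]; rfl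
    by_cases k5 : "test:" = key
    · simp only [if_neg k1, if_neg k2, if_neg k3, if_neg k4, if_pos k5]; rfl
    by_cases k6 : "ci:" = key
    · simp only [if_neg k1, if_neg k2, if_neg k3, if_neg k4, if_neg k5, if_pos k6]; rfl
    by_cases k7 : "chore:" = key
    · simp only [if_neg k1, if_neg k2, if_neg k3, if_neg k4, if_neg k5, if_neg k6, if_pos k7]; rfl
    · simp only [if_neg k1, if_neg k2, if_neg k3, if_neg k4, if_neg k5, if_neg k6, if_neg k7]; rfl
  · have hA : ∀ p (q : List Char), p.toList = q ++ [':'] → ':' ∉ q →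
        PySem.Str.startswith s p = false := by
      intro p q hp hq
      rw [Bool.eq_false_iff]
      intro hc
      rw [PySem.Str.startswith_eq, hp] at hc
      have := ((pv_startswith_iff_key s.toList q hq).mp hc).1
      apply h0
      simpa [PySem.Str.find_eq] using this
    simp only [pvFindSectionA, pvSections, List.any_cons, List.any_nil, Bool.or_false, h0, if_false,
      hA "feat:" ['f','e','a','t'] rfl (by decide),
      hA "fix:" ['f','i','x'] rfl (by decide),
      hA "docs:" ['d','o','c','s'] rfl (by decide),
      hA "refactor:" ['r','e','f','a','c','t','o','r'] rfl (by decide),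
      hA "test:" ['t','e','s','t'] rfl (by decide),
      hA "ci:" ['c','i'] rfl (by decide),
      hA "chore:" ['c','h','o','r','e'] rfl (by decide)]
    rfl

-- ===== VERDICT (by name: the statement is the Claim_ definition above) =====
theorem categorize_commits_spec : Claim_equal_categorize_commits := by
  intro commits _
  unfold Spec_categorize_commits
  simp only [categorize_commits, categorize_commits_alt]
  congr 2
  funext b subject
  have hmatch : (match pvFindSectionA (PySem.Str.lower subject) pvSections with
      | some sec => PySem.Dict.modify b sec [] (fun xs => xs ++ [subject])
      | none => PySem.Dict.modify b "Other" [] (fun xs => xs ++ [subject]))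
      = PySem.Dict.modify b
          (match pvFindSectionA (PySem.Str.lower subject) pvSections with
           | some sec => sec | none => "Other") [] (fun xs => xs ++ [subject]) := by
    cases pvFindSectionA (PySem.Str.lower subject) pvSections <;> rfl
  rw [hmatch, pv_sel_eq]
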